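-- pv_equiv track=rewrite | github.com/meibohuhu/EE559 | 559project/data.py | idx_clf
-- ===== SOURCE A (Python) =====
-- def idx_clf(id_list):
--     total_index = []
--     i_0 = id_list[0]
--     tmp_list = []
--     tmp_list.append(0)
--     for i in range(1, len(id_list)):
--         if id_list[i] != i_0:
--             total_index.append(tmp_list)
--             tmp_list = []
--         tmp_list.append(i)
--         i_0 = id_list[i]
--
--     total_index.append(tmp_list)
--     return total_index
-- ===== SOURCE B (Python) =====
-- def idx_clf(id_list):
--     res = []
--     offset = 0
--     n = len(id_list)
--     while offset < n:
--         j = offset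
--         while j < n and id_list[j] == id_list[offset]:
--             j += 1
--         res.append(list(range(offset, j)))
--         offset = j
--     return res
-- ===== Notes on version B (the rewrite author's own statement) =====
-- stated objective: alternative
-- what changed: Replaces A's adjacent-comparison accumulator (tmp list flushed on every id change, tracking the previous id) by a two-pointer run scan that finds each maximal run of equal ids directly and emits its index block as an arithmetic range from offset to the run's end.
import Mathlib
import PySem

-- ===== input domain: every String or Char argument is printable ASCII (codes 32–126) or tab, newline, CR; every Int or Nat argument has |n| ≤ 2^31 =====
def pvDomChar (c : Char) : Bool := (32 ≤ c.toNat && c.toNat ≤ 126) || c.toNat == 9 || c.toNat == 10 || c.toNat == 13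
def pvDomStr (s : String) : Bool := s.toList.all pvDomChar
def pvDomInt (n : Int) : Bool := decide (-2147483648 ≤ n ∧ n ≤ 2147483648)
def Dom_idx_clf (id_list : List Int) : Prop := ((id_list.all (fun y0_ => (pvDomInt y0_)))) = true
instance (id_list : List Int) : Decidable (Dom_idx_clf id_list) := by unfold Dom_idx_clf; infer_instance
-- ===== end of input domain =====

-- B replaces A's flush-on-change accumulator by a two-pointer run scan emitting arithmetic
-- index ranges (objective: alternative, same O(n) cost); equivalence proved on non-empty lists.

-- ===== PORT A =====
-- loop body of A: if id_list[i] != i_0 flush tmp; tmp.append(i); i_0 = id_list[i]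
def aStep (xs : List Int) (st : List (List Int) × Int × List Int) (i : Int) :
    List (List Int) × Int × List Int :=
  let v := PySem.List.pyGetD xs i 0
  if v ≠ st.2.1 then (st.1 ++ [st.2.2], v, [i]) else (st.1, v, st.2.2 ++ [i])

def idx_clf (id_list : List Int) : List (List Int) :=
  match PySem.List.pyGet? id_list 0 with
  | none => []  -- IndexError on the empty list; excluded by Pre_
  | some i0 =>
    let st := (PySem.List.pyRange 1 (id_list.length : Int) 1).foldl (aStep id_list) ([], i0, [0])
    st.1 ++ [st.2.2]

-- ===== PORT B =====
-- inner while loop of B: advance j while id_list[j] == id_list[offset]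
def bRun (xs : List Int) (off j : Nat) : Nat :=
  if h : j < xs.length ∧ xs.getD j 0 = xs.getD off 0 then bRun xs off (j + 1) else j
termination_by xs.length - j
decreasing_by omega

theorem le_bRun (xs : List Int) (off j : Nat) : j ≤ bRun xs off j := by
  unfold bRun
  split
  · exact le_trans (by omega) (le_bRun xs off (j + 1))
  · exact le_refl j
termination_by xs.length - j
decreasing_by omega

theorem lt_bRun (xs : List Int) (off : Nat) (h : off < xs.length) : off < bRun xs off off := by
  unfold bRun
  rw [dif_pos ⟨h, rfl⟩]
  exact lt_of_lt_of_le (Nat.lt_succ_self off) (le_bRun xs off (off + 1))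

-- outer while loop of B, on the running offset
def bLoop (xs : List Int) (off : Nat) : List (List Int) :=
  if h : off < xs.length then
    PySem.List.pyRange (off : Int) ((bRun xs off off : Nat) : Int) 1 :: bLoop xs (bRun xs off off)
  else []
termination_by xs.length - off
decreasing_by have := lt_bRun xs off h; omega

def idx_clf_alt (id_list : List Int) : List (List Int) := bLoop id_list 0

-- ===== PRECONDITION & SPEC =====
-- Pre_ excludes only the empty list, on which A raises IndexError reading its first element.
def Pre_idx_clf (id_list : List Int) : Prop := id_list ≠ []
instance (id_list : List Int) : Decidable (Pre_idx_clf id_list) := by unfold Pre_idx_clf; infer_instance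
def pvWitness_idx_clf : List Int := [1, 1, 2]

def Spec_idx_clf (id_list : List Int) (out : List (List Int)) : Prop := out = idx_clf_alt id_list
instance (id_list : List Int) (out : List (List Int)) : Decidable (Spec_idx_clf id_list out) := by unfold Spec_idx_clf; infer_instance

-- ===== CLAIM (what is proved, stated in full; the proofs are below) =====
def Claim_equal_idx_clf : Prop := ∀ (id_list : List Int), Dom_idx_clf id_list → Pre_idx_clf id_list → Spec_idx_clf id_list (idx_clf id_list)

-- ===== LEMMAS AND PROOFS =====

theorem bRun_le (xs : List Int) (off j : Nat) (hj : j ≤ xs.length) : bRun xs off j ≤ xs.length := by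
  unfold bRun
  split
  · next h => exact bRun_le xs off (j + 1) h.1
  · exact hj
termination_by xs.length - j
decreasing_by omega

theorem bRun_run (xs : List Int) (off j : Nat) :
    ∀ i, j ≤ i → i < bRun xs off j → xs.getD i 0 = xs.getD off 0 := by
  intro i hji hi
  rw [bRun] at hi
  split at hi
  · next h =>
    rcases Nat.eq_or_lt_of_le hji with rfl | hlt
    · exact h.2
    · exact bRun_run xs off (j + 1) i hlt hi
  · omega
termination_by xs.length - j
decreasing_by omega

theorem bRun_stop (xs : List Int) (off j : Nat) (h : bRun xs off j < xs.length) :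
    xs.getD (bRun xs off j) 0 ≠ xs.getD off 0 := by
  by_cases hc : j < xs.length ∧ xs.getD j 0 = xs.getD off 0
  · rw [bRun, dif_pos hc] at h ⊢
    exact bRun_stop xs off (j + 1) h
  · rw [bRun, dif_neg hc] at h ⊢
    intro heq
    exact hc ⟨h, heq⟩
termination_by xs.length - j
decreasing_by omega

-- folding A's step over a range of indices whose values all equal the tracked id only grows tmp
theorem foldl_run (xs : List Int) (a b v : Int) (total : List (List Int)) (tmp : List Int)
    (hrun : ∀ i, a ≤ i → i < b → PySem.List.pyGetD xs i 0 = v) :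
    (PySem.List.pyRange a b 1).foldl (aStep xs) (total, v, tmp)
      = (total, v, tmp ++ PySem.List.pyRange a b 1) := by
  by_cases hab : b ≤ a
  · simp [PySem.List.pyRange_one_eq_nil hab]
  · rw [not_le] at hab
    rw [PySem.List.pyRange_one_cons hab]
    have hv : PySem.List.pyGetD xs a 0 = v := hrun a le_rfl hab
    have hstep : aStep xs (total, v, tmp) a = (total, v, tmp ++ [a]) := by
      simp [aStep, hv]
    rw [List.foldl_cons, hstep,
        foldl_run xs (a + 1) b v total (tmp ++ [a]) (fun i h1 h2 => hrun i (by omega) h2)]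
    simp
termination_by (b - a).toNat
decreasing_by omega

-- A's loop, entered at the start of a run with tmp = [off] and i_0 = xs[off], produces B's runs
theorem main_run (xs : List Int) (off : Nat) (hoff : off < xs.length) (total : List (List Int)) :
    (let r := (PySem.List.pyRange ((off : Int) + 1) (xs.length : Int) 1).foldl (aStep xs)
        (total, xs.getD off 0, [(off : Int)])
     r.1 ++ [r.2.2]) = total ++ bLoop xs off := by
  have hj1 : off < bRun xs off off := lt_bRun xs off hoff
  have hjle : bRun xs off off ≤ xs.length := bRun_le xs off off (le_of_lt hoff)
  set j := bRun xs off off with hjdef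
  have hsplit : PySem.List.pyRange ((off : Int) + 1) (xs.length : Int) 1
      = PySem.List.pyRange ((off : Int) + 1) (j : Int) 1
        ++ PySem.List.pyRange (j : Int) (xs.length : Int) 1 :=
    PySem.List.pyRange_one_append _ _ _ (by exact_mod_cast hj1) (by exact_mod_cast hjle)
  have hrun : ∀ i : Int, (off : Int) + 1 ≤ i → i < (j : Int) →
      PySem.List.pyGetD xs i 0 = xs.getD off 0 := by
    intro i h1 h2
    have h0 : 0 ≤ i := by omega
    have : i = ((i.toNat : Nat) : Int) := by omega
    rw [this, PySem.List.pyGetD_natCast]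
    exact bRun_run xs off off i.toNat (by omega) (by omega)
  have hfold1 : (PySem.List.pyRange ((off : Int) + 1) (j : Int) 1).foldl (aStep xs)
      (total, xs.getD off 0, [(off : Int)])
      = (total, xs.getD off 0, PySem.List.pyRange (off : Int) (j : Int) 1) := by
    rw [foldl_run xs _ _ _ total [(off : Int)] hrun,
        PySem.List.pyRange_one_cons (a := (off : Int)) (by exact_mod_cast hj1)]
    rfl
  rw [hsplit, List.foldl_append, hfold1]
  by_cases hjlen : j < xs.length
  · -- a new run starts at j
    have hne : xs.getD j 0 ≠ xs.getD off 0 := bRun_stop xs off off hjlen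
    rw [PySem.List.pyRange_one_cons (a := (j : Int)) (by exact_mod_cast hjlen), List.foldl_cons]
    have hstep : aStep xs (total, xs.getD off 0, PySem.List.pyRange (off : Int) (j : Int) 1) (j : Int)
        = (total ++ [PySem.List.pyRange (off : Int) (j : Int) 1], xs.getD j 0, [(j : Int)]) := by
      simp only [aStep, PySem.List.pyGetD_natCast]
      rw [if_pos hne]
    rw [hstep]
    have hrec := main_run xs j hjlen (total ++ [PySem.List.pyRange (off : Int) (j : Int) 1])
    simp only at hrec ⊢
    rw [hrec]
    conv_rhs => rw [bLoop]
    rw [dif_pos hoff, ← hjdef]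
    simp
  · -- the run reaches the end of the list
    have hjeq : j = xs.length := by omega
    rw [show PySem.List.pyRange (j : Int) (xs.length : Int) 1 = [] from
          PySem.List.pyRange_one_eq_nil (by omega), List.foldl_nil]
    simp only
    conv_rhs => rw [bLoop]
    rw [dif_pos hoff, ← hjdef,
        show bLoop xs j = [] from by rw [bLoop, dif_neg (by omega)]]
termination_by xs.length - off
decreasing_by omega

-- ===== VERDICT (by name: the statement is the Claim_ definition above) =====
theorem idx_clf_spec : Claim_equal_idx_clf := by
  intro xs _ hpre
  unfold Spec_idx_clf idx_clf idx_clf_alt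
  obtain ⟨y, t, rfl⟩ : ∃ y t, xs = y :: t := by
    cases xs with
    | nil => exact absurd rfl hpre
    | cons y t => exact ⟨y, t, rfl⟩
  rw [PySem.List.pyGet?_zero_cons]
  have h := main_run (y :: t) 0 (by simp) []
  simpa using h
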